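-- pv_equiv track=rewrite | github.com/seopbo/codility_lessons | Counting_Elements/swap_the_elements.py | solution
-- ===== SOURCE A (Python) =====
-- def counting(A, m):
--     n = len(A)
--     count = [0] * (m + 1)
--
--     for k in range(n):
--         count[A[k]] += 1
--     return count
--
-- def solution(A, B, m):
--     n = len(A)
--     sum_a = sum(A)
--     sum_b = sum(B)
--     d = sum_b - sum_a
--
--     if d % 2 == 1:
--         return False
--
--     d //= 2
--
--     count = counting(A, m)
--
--     for i in range(n):
--         if 0 <= B[i] - d <= m and count[B[i] - d] > 0:
--             return True
--
--     return False
-- ===== SOURCE B (Python) =====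
-- def solution(A, B, m):
--     d = sum(B) - sum(A)
--     if d % 2:
--         return False
--     d //= 2
--     xs = sorted(A)
--     ys = sorted(b - d for b in B[:len(A)])
--     i = j = 0
--     while i < len(xs) and j < len(ys):
--         if xs[i] == ys[j]:
--             return True
--         if xs[i] < ys[j]:
--             i += 1
--         else:
--             j += 1
--     return False
-- ===== Notes on version B (the rewrite author's own statement) =====
-- stated objective: alternative
-- what changed: Replaces A's value-indexed count table (size m+1) and per-element table lookups by sorting A and the shifted values [b-d for b in B[:len(A)]] and scanning both sorted lists with a two-pointer merge for a common element; the parity early-exit on d is kept.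
-- outside the precondition, e.g. on solution([-1], [1], 0): A returns True, B returns False; on solution([0, 0], [0], 0): A returns True, B returns True
import Mathlib
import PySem

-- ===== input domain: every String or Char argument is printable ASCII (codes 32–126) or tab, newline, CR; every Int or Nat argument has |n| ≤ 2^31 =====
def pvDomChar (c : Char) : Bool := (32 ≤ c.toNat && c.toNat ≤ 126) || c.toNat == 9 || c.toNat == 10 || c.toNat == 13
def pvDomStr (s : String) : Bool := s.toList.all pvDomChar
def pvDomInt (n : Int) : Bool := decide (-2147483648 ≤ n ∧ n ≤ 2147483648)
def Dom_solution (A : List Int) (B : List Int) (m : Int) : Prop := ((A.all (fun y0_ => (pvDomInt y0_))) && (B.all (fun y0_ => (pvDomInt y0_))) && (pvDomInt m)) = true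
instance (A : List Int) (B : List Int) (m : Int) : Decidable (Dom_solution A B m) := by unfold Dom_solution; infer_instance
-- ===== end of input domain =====

-- B replaces A's count-table lookup (an O(m) table over values 0..m) by sorting A and the
-- shifted B values and running a two-pointer merge scan for a common element (objective: alternative).

-- ===== PORT A =====
def counting (A : List Int) (m : Int) : List Int :=
  let n := PySem.List.len A
  (PySem.List.pyRange 0 n 1).foldl
    (fun count k =>
      let v := PySem.List.pyGetD A k 0
      PySem.List.pySetD count v (PySem.List.pyGetD count v 0 + 1))
    (List.replicate (m + 1).toNat 0)

def solution (A : List Int) (B : List Int) (m : Int) : Bool :=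
  let n := PySem.List.len A
  let sum_a := A.sum
  let sum_b := B.sum
  let d := sum_b - sum_a
  if PySem.Int.mod d 2 = 1 then false
  else
    let d2 := PySem.Int.floordiv d 2
    let count := counting A m
    (PySem.List.pyRange 0 n 1).any (fun i =>
      let v := PySem.List.pyGetD B i 0 - d2
      decide (0 ≤ v) && decide (v ≤ m) && decide (0 < PySem.List.pyGetD count v 0))

-- ===== PORT B =====
def mergeHas : List Int → List Int → Bool
  | x :: xs, y :: ys =>
    if x = y then true
    else if x < y then mergeHas xs (y :: ys)
    else mergeHas (x :: xs) ys
  | _, _ => false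

def solution_alt (A : List Int) (B : List Int) (m : Int) : Bool :=
  let d := B.sum - A.sum
  if PySem.Int.mod d 2 ≠ 0 then false
  else
    let d2 := PySem.Int.floordiv d 2
    let xs := PySem.List.sorted A (fun x => x) false
    let ys := PySem.List.sorted
      ((PySem.List.slice B none (some (PySem.List.len A))).map (fun b => b - d2)) (fun x => x) false
    mergeHas xs ys

-- ===== PRECONDITION & SPEC =====
-- Unless the sum-difference is odd (then both programs stop at the parity check, so such inputs
-- stay inside Pre_), Pre_ excludes the inputs where A raises IndexError (an element of A above m
-- or below -(m+1), or B shorter than A reaching an out-of-range B[i]) and the inputs with negative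
-- elements of A, where A's value comes from negative-index wraparound into the count table (an
-- artefact), or with B shorter than A, where A's early True before the inevitable IndexError is
-- accidental.
def Pre_solution (A : List Int) (B : List Int) (m : Int) : Prop :=
  PySem.Int.mod (B.sum - A.sum) 2 = 1 ∨
    (A.length ≤ B.length ∧ ∀ a ∈ A, 0 ≤ a ∧ a ≤ m)
instance (A : List Int) (B : List Int) (m : Int) : Decidable (Pre_solution A B m) := by
  unfold Pre_solution; infer_instance

def pvWitness_solution : List Int × List Int × Int := ([1, 2], [3, 0], 3)

def Spec_solution (A : List Int) (B : List Int) (m : Int) (out : Bool) : Prop := out = solution_alt A B m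
instance (A : List Int) (B : List Int) (m : Int) (out : Bool) : Decidable (Spec_solution A B m out) := by unfold Spec_solution; infer_instance

-- ===== CLAIM (what is proved, stated in full; the proofs are below) =====
def Claim_equal_solution : Prop := ∀ (A : List Int) (B : List Int) (m : Int), Dom_solution A B m → Pre_solution A B m → Spec_solution A B m (solution A B m)

-- ===== LEMMAS AND PROOFS =====

theorem count_foldl (A : List Int) (c : List Int) (v : Int)
    (hA : ∀ a ∈ A, 0 ≤ a ∧ a < (c.length : Int)) (hv : 0 ≤ v) (hvlt : v < (c.length : Int)) :
    PySem.List.pyGetD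
      (A.foldl (fun count a => PySem.List.pySetD count a (PySem.List.pyGetD count a 0 + 1)) c) v 0
      = PySem.List.pyGetD c v 0 + (A.count v : Int) := by
  induction A generalizing c with
  | nil => simp
  | cons a as ih =>
    obtain ⟨ha0, halt⟩ := hA a (by simp)
    have hlen : (PySem.List.pySetD c a (PySem.List.pyGetD c a 0 + 1)).length = c.length := by
      rw [PySem.List.pySetD_of_nonneg c _ ha0]; simp
    rw [List.foldl_cons, ih _ (fun x hx => by rw [hlen]; exact hA x (by simp [hx])) (by rw [hlen]; exact hvlt)]
    have hget : PySem.List.pyGetD (PySem.List.pySetD c a (PySem.List.pyGetD c a 0 + 1)) v 0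
        = if v = a then PySem.List.pyGetD c v 0 + 1 else PySem.List.pyGetD c v 0 := by
      rw [PySem.List.pySetD_of_nonneg c _ ha0,
          PySem.List.pyGetD_eq_getElem _ _ hv (by simpa using hvlt),
          PySem.List.pyGetD_eq_getElem _ _ hv (by simpa using hvlt) ,
          PySem.List.pyGetD_eq_getElem _ _ ha0 halt]
      rw [List.getElem_set]
      by_cases hva : v = a
      · subst hva; simp
      · rw [if_neg (by omega), if_neg hva]
    rw [hget, List.count_cons]
    simp only [beq_iff_eq]
    rcases eq_or_ne v a with rfl | hva
    · rw [if_pos rfl, if_pos rfl]; push_cast; ring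
    · rw [if_neg hva, if_neg (Ne.symm hva)]; push_cast; ring

theorem mergeHas_iff (xs ys : List Int) (hx : xs.Pairwise (· ≤ ·)) (hy : ys.Pairwise (· ≤ ·)) :
    mergeHas xs ys = true ↔ ∃ v, v ∈ xs ∧ v ∈ ys := by
  induction xs, ys using mergeHas.induct with
  | case1 x xs ys => simp [mergeHas]
  | case2 x xs y ys hne hlt ih =>
    rw [mergeHas]
    simp only [if_neg hne, if_pos hlt]
    rw [ih hx.of_cons hy]
    constructor
    · rintro ⟨v, h1, h2⟩; exact ⟨v, List.mem_cons_of_mem _ h1, h2⟩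
    · rintro ⟨v, h1, h2⟩
      rcases List.mem_cons.mp h1 with rfl | h1
      · rcases List.mem_cons.mp h2 with rfl | h2
        · exact absurd rfl hne
        · have := (List.pairwise_cons.mp hy).1 v h2; omega
      · exact ⟨v, h1, h2⟩
  | case3 x xs y ys hne hge ih =>
    rw [mergeHas]
    simp only [if_neg hne, if_neg hge]
    rw [ih hx hy.of_cons]
    constructor
    · rintro ⟨v, h1, h2⟩; exact ⟨v, h1, List.mem_cons_of_mem _ h2⟩
    · rintro ⟨v, h1, h2⟩
      rcases List.mem_cons.mp h2 with rfl | h2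
      · rcases List.mem_cons.mp h1 with rfl | h1
        · exact absurd rfl hne
        · have := (List.pairwise_cons.mp hx).1 v h1; omega
      · exact ⟨v, h1, h2⟩
  | case4 xs ys h =>
    cases xs with
    | nil => simp [mergeHas]
    | cons a as =>
      cases ys with
      | nil => simp [mergeHas]
      | cons b bs => exact (h a as b bs rfl rfl).elim


theorem counting_pos (A : List Int) (m v : Int)
    (hA : ∀ a ∈ A, 0 ≤ a ∧ a ≤ m) (hv : 0 ≤ v) (hvm : v ≤ m) :
    (0 < PySem.List.pyGetD (counting A m) v 0) ↔ v ∈ A := by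
  have hm1 : ((m + 1).toNat : Int) = m + 1 := by omega
  have hc : counting A m = A.foldl
      (fun count a => PySem.List.pySetD count a (PySem.List.pyGetD count a 0 + 1))
      (List.replicate (m + 1).toNat 0) := by
    unfold counting
    exact PySem.List.foldl_pyRange_pyGetD
      (f := fun acc x => PySem.List.pySetD acc x (PySem.List.pyGetD acc x 0 + 1))
      (xs := A) (d := 0) (init := List.replicate (m + 1).toNat 0) (le_refl 0)
  rw [hc]
  rw [count_foldl A _ v (fun a ha => by
        obtain ⟨h1, h2⟩ := hA a ha
        refine ⟨h1, ?_⟩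
        rw [List.length_replicate, hm1]; omega)
      hv (by rw [List.length_replicate, hm1]; omega)]
  rw [PySem.List.pyGetD_eq_getElem _ _ hv (by rw [List.length_replicate, hm1]; omega)]
  rw [List.getElem_replicate]
  simp only [zero_add]
  exact_mod_cast List.count_pos_iff

theorem a_side (A B : List Int) (m d2 : Int)
    (hlen : A.length ≤ B.length) (hA : ∀ a ∈ A, 0 ≤ a ∧ a ≤ m) :
    ((PySem.List.pyRange 0 (PySem.List.len A) 1).any (fun i =>
        decide (0 ≤ PySem.List.pyGetD B i 0 - d2) && decide (PySem.List.pyGetD B i 0 - d2 ≤ m) &&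
          decide (0 < PySem.List.pyGetD (counting A m) (PySem.List.pyGetD B i 0 - d2) 0)) = true)
      ↔ ∃ v, v ∈ A ∧ v ∈ (B.take A.length).map (fun b => b - d2) := by
  rw [List.any_eq_true]
  constructor
  · rintro ⟨i, hi, hp⟩
    rw [PySem.List.mem_pyRange_one] at hi
    rw [PySem.List.len_eq] at hi
    simp only [Bool.and_eq_true, decide_eq_true_eq] at hp
    obtain ⟨⟨h0, hm'⟩, hc⟩ := hp
    have hiB : i < (B.length : Int) := by omega
    rw [PySem.List.pyGetD_eq_getElem _ _ hi.1 hiB] at h0 hm' hc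
    set v := B[i.toNat] - d2 with hvdef
    refine ⟨v, (counting_pos A m v hA h0 hm').mp hc, ?_⟩
    rw [List.mem_map]
    refine ⟨B[i.toNat], ?_, rfl⟩
    rw [List.mem_take_iff_getElem]
    exact ⟨i.toNat, by omega, rfl⟩
  · rintro ⟨v, hvA, hvB⟩
    rw [List.mem_map] at hvB
    obtain ⟨b, hb, rfl⟩ := hvB
    rw [List.mem_take_iff_getElem] at hb
    obtain ⟨k, hk, rfl⟩ := hb
    refine ⟨(k : Int), ?_, ?_⟩
    · rw [PySem.List.mem_pyRange_one, PySem.List.len_eq]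
      constructor
      · exact Int.natCast_nonneg k
      · exact_mod_cast (by omega : k < A.length)
    · obtain ⟨h0, hm'⟩ := hA _ hvA
      simp only [Bool.and_eq_true, decide_eq_true_eq]
      rw [PySem.List.pyGetD_eq_getElem _ _ (Int.natCast_nonneg k)
            (by exact_mod_cast (by omega : k < B.length))]
      simp only [Int.toNat_natCast]
      exact ⟨⟨h0, hm'⟩, (counting_pos A m _ hA h0 hm').mpr hvA⟩

theorem b_side (A L : List Int) :
    (mergeHas (PySem.List.sorted A (fun x => x) false) (PySem.List.sorted L (fun x => x) false) = true)
      ↔ ∃ v, v ∈ A ∧ v ∈ L := by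
  rw [mergeHas_iff _ _ (PySem.List.sorted_pairwise A (fun x => x)) (PySem.List.sorted_pairwise L (fun x => x))]
  simp only [PySem.List.mem_sorted]

-- ===== VERDICT (by name: the statement is the Claim_ definition above) =====
theorem solution_spec : Claim_equal_solution := by
  intro A B m _hDom hPre
  unfold Spec_solution solution solution_alt
  have hd : PySem.Int.mod (B.sum - A.sum) 2 = 0 ∨ PySem.Int.mod (B.sum - A.sum) 2 = 1 := by
    have h1 := PySem.Int.mod_nonneg (B.sum - A.sum) (by omega : (0:Int) < 2)
    have h2 := PySem.Int.mod_lt (B.sum - A.sum) (by omega : (0:Int) < 2)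
    omega
  rcases hd with hd | hd
  · obtain ⟨hlen, hA⟩ := hPre.resolve_left (by rw [hd]; decide)
    rw [if_neg (by rw [hd]; decide), if_neg (not_not_intro hd)]
    rw [Bool.eq_iff_iff]
    rw [a_side A B m _ hlen hA, b_side]
    rw [PySem.List.len_eq, PySem.List.slice_to_natCast]
  · rw [if_pos hd, if_pos (by rw [hd]; decide)]
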